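-- pv_equiv track=rewrite | github.com/haya14busa/atcoder | ARC/042/a.py | solve
-- ===== SOURCE A (Python) =====
-- def solve(n_of_slead, n_of_w, ws):
--     assert 1 <= n_of_slead <= 10 ** 5
--     assert 1 <= n_of_w <= 10 ** 5
--     sleads = range(1, n_of_slead + 1)
--     wsleads = []
--     wslead_set = set()
--     for w in reversed(ws):
--         if w not in wslead_set:
--             wsleads.append(w)
--             wslead_set.add(w)
--     rest = sorted(set(sleads) - wslead_set)
--     return wsleads + rest
-- ===== SOURCE B (Python) =====
-- def solve(n_of_slead, n_of_w, ws):
--     assert 1 <= n_of_slead <= 10 ** 5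
--     assert 1 <= n_of_w <= 10 ** 5
--     last = {w: i for i, w in enumerate(ws)}
--     res = [w for i, w in enumerate(ws) if last[w] == i]
--     res.reverse()
--     res += [x for x in range(1, n_of_slead + 1) if x not in last]
--     return res
-- ===== Notes on version B (the rewrite author's own statement) =====
-- stated objective: alternative
-- what changed: Replaces A's grow-a-set dedup over reversed ws and the final sorted() of a set difference by a last-occurrence-index dict, a keep-only-last-occurrence filter (then reversed), and an in-order scan of range(1, n+1) that needs no sort.
import Mathlib
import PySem

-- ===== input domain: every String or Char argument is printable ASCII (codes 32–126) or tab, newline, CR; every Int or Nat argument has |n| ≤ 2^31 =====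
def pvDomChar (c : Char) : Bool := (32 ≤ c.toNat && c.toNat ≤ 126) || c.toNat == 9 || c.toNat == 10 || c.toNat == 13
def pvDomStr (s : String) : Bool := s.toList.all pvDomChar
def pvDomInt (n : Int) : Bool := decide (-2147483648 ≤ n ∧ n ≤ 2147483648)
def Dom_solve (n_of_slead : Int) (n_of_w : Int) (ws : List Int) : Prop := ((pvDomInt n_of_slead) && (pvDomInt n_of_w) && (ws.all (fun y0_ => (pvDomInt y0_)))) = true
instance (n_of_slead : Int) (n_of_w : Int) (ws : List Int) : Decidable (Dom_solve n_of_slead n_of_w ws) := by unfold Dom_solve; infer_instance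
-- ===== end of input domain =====

-- B replaces A's dedup-by-growing-set and its final sort by a last-occurrence-index dict,
-- a keep-if-last filter (reversed), and an in-order scan of range(1, n+1); alternative, same cost.

-- ===== PORT A =====
def solve (n_of_slead : Int) (n_of_w : Int) (ws : List Int) : List Int :=
  let sleads := PySem.List.pyRange 1 (n_of_slead + 1) 1
  let st := ws.reverse.foldl
    (fun (p : List Int × PySem.Set Int) w =>
      if !(PySem.Set.contains p.2 w) then (p.1 ++ [w], PySem.Set.add p.2 w) else p)
    ([], PySem.Set.empty)
  st.1 ++ PySem.List.sorted (PySem.Set.diff (PySem.Set.ofList sleads) st.2) (fun x => x)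

-- ===== PORT B =====
def solve_alt (n_of_slead : Int) (n_of_w : Int) (ws : List Int) : List Int :=
  let last : PySem.Dict Int Int :=
    (PySem.List.enumerate ws).foldl (fun d p => d.insert p.2 p.1) PySem.Dict.empty
  let res := (((PySem.List.enumerate ws).filter
      (fun p => PySem.Dict.get? last p.2 == some p.1)).map (fun p => p.2)).reverse
  res ++ (PySem.List.pyRange 1 (n_of_slead + 1) 1).filter
      (fun x => !(PySem.Dict.contains last x))

-- ===== PRECONDITION & SPEC =====
-- Pre_: exactly A's asserts; outside them Python A raises AssertionError.
def Pre_solve (n_of_slead : Int) (n_of_w : Int) (ws : List Int) : Prop :=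
  1 ≤ n_of_slead ∧ n_of_slead ≤ 100000 ∧ 1 ≤ n_of_w ∧ n_of_w ≤ 100000
instance (n_of_slead : Int) (n_of_w : Int) (ws : List Int) : Decidable (Pre_solve n_of_slead n_of_w ws) := by unfold Pre_solve; infer_instance
def pvWitness_solve : Int × Int × List Int := (3, 2, [2, 5, 2])

def Spec_solve (n_of_slead : Int) (n_of_w : Int) (ws : List Int) (out : List Int) : Prop := out = solve_alt n_of_slead n_of_w ws
instance (n_of_slead : Int) (n_of_w : Int) (ws : List Int) (out : List Int) : Decidable (Spec_solve n_of_slead n_of_w ws out) := by unfold Spec_solve; infer_instance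

-- ===== CLAIM (what is proved, stated in full; the proofs are below) =====
def Claim_equal_solve : Prop := ∀ (n_of_slead : Int) (n_of_w : Int) (ws : List Int), Dom_solve n_of_slead n_of_w ws → Pre_solve n_of_slead n_of_w ws → Spec_solve n_of_slead n_of_w ws (solve n_of_slead n_of_w ws)

-- ===== LEMMAS AND PROOFS =====

-- B's last-occurrence dict, named for the proofs
def lastD (ws : List Int) : PySem.Dict Int Int :=
  (PySem.List.enumerate ws).foldl (fun d p => d.insert p.2 p.1) PySem.Dict.empty

-- A's loop with the list and the set started equal keeps them equal: it is the Set.add fold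
theorem loopA (l : List Int) (s : PySem.Set Int) :
    l.foldl (fun (p : List Int × PySem.Set Int) w =>
        if !(PySem.Set.contains p.2 w) then (p.1 ++ [w], PySem.Set.add p.2 w) else p) (s, s)
      = (l.foldl PySem.Set.add s, l.foldl PySem.Set.add s) := by
  induction l generalizing s with
  | nil => rfl
  | cons x t ih =>
    have hx : (if !(PySem.Set.contains s x) then (s ++ [x], PySem.Set.add s x) else (s, s))
        = (PySem.Set.add s x, PySem.Set.add s x) := by
      by_cases h : x ∈ s
      · simp [h]
      · have hc : PySem.Set.contains s x = false := by
          cases hcc : PySem.Set.contains s x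
          · rfl
          · exact absurd ((PySem.Set.contains_iff s x).mp hcc) h
        simp [h]
    simp only [List.foldl_cons, hx]
    exact ih _

theorem enum_bound (l : List Int) (s : Int) :
    ∀ p ∈ PySem.List.enumerate l s, s ≤ p.1 ∧ p.1 < s + l.length := by
  induction l generalizing s with
  | nil => intro p hp; simp [PySem.List.enumerate_nil] at hp
  | cons x t ih =>
    intro p hp
    rw [PySem.List.enumerate_cons] at hp
    rcases List.mem_cons.mp hp with hp | hp
    · subst hp; simp
    · have := ih (s + 1) p hp
      simp only [List.length_cons]
      push_cast
      omega

theorem lastD_append (l : List Int) (x : Int) :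
    lastD (l ++ [x]) = (lastD l).insert x (l.length : Int) := by
  unfold lastD
  rw [PySem.List.enumerate_append, List.foldl_append]
  simp [PySem.List.enumerate_cons, PySem.List.enumerate_nil]

theorem keepLast_eq (ws : List Int) :
    ((PySem.List.enumerate ws).filter
        (fun p => PySem.Dict.get? (lastD ws) p.2 == some p.1)).map (fun p => p.2)
      = (PySem.Set.ofList ws.reverse).reverse := by
  induction ws using List.reverseRecOn with
  | nil => rfl
  | append_singleton l x ih =>
    rw [PySem.List.enumerate_append, List.filter_append, lastD_append]
    have htail : (PySem.List.enumerate [x] (0 + (l.length : Int))).filter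
        (fun p => PySem.Dict.get? ((lastD l).insert x (l.length : Int)) p.2 == some p.1)
        = [((l.length : Int), x)] := by
      simp [PySem.List.enumerate_cons, PySem.List.enumerate_nil,
        PySem.Dict.get?_insert_self]
    have hhead : (PySem.List.enumerate l 0).filter
        (fun p => PySem.Dict.get? ((lastD l).insert x (l.length : Int)) p.2 == some p.1)
        = ((PySem.List.enumerate l 0).filter
            (fun p => PySem.Dict.get? (lastD l) p.2 == some p.1)).filter
          (fun p => !(p.2 == x)) := by
      rw [List.filter_filter]
      apply List.filter_congr
      intro p hp
      have hb := enum_bound l 0 p hp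
      by_cases hpx : p.2 = x
      · rw [hpx, PySem.Dict.get?_insert_self]
        have hne : ¬ ((l.length : Int) = p.1) := by omega
        simp [hne]
      · rw [PySem.Dict.get?_insert_of_ne _ _ hpx]
        simp [hpx]
    rw [htail, hhead, List.map_append]
    have hmapfilter : (((PySem.List.enumerate l 0).filter
          (fun p => PySem.Dict.get? (lastD l) p.2 == some p.1)).filter
            (fun p => !(p.2 == x))).map (fun p => p.2)
        = (((PySem.List.enumerate l 0).filter
          (fun p => PySem.Dict.get? (lastD l) p.2 == some p.1)).map (fun p => p.2)).filter
            (fun y => !(y == x)) := by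
      rw [List.filter_map]
      rfl
    rw [hmapfilter, ih]
    have hrhs : (l ++ [x]).reverse = x :: l.reverse := by
      simp
    rw [hrhs, PySem.Set.ofList_cons]
    show ((PySem.Set.ofList l.reverse).reverse.filter (fun y => !(y == x))) ++ [x]
        = (x :: (PySem.Set.ofList l.reverse).discard x).reverse
    rw [List.reverse_cons]
    show _ = ((PySem.Set.ofList l.reverse).filter (fun y => !(y == x))).reverse ++ [x]
    rw [List.filter_reverse]

theorem lastD_contains (ws : List Int) (x : Int) :
    PySem.Dict.contains (lastD ws) x = true ↔ x ∈ ws := by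
  unfold lastD
  have hk := PySem.Dict.keys_foldl_insert_key (ν := Int) (PySem.List.enumerate ws)
    (fun p => p.2) (fun _ p => p.1) PySem.Dict.empty
  rw [PySem.List.map_snd_enumerate] at hk
  rw [PySem.Dict.contains_iff_mem_keys, hk,
    show (PySem.Dict.empty : PySem.Dict Int Int).keys = [] from rfl,
    PySem.Set.update_nil_left ws]
  exact PySem.Set.mem_ofList ws x

theorem pyRange_pairwise_lt (n : Int) :
    List.Pairwise (· < ·) (PySem.List.pyRange 1 (n + 1) 1) := by
  rw [PySem.List.pyRange_of_pos 1 (n + 1) (by norm_num)]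
  refine List.Pairwise.map _ ?_ (List.pairwise_lt_range)
  intro a b hab
  omega

theorem rest_eq (n : Int) (s : PySem.Set Int) :
    PySem.List.sorted (PySem.Set.diff (PySem.Set.ofList (PySem.List.pyRange 1 (n + 1) 1)) s) (fun x => x)
      = (PySem.List.pyRange 1 (n + 1) 1).filter (fun x => !(PySem.Set.contains s x)) := by
  have hpw := pyRange_pairwise_lt n
  have hnd : (PySem.List.pyRange 1 (n + 1) 1).Nodup := hpw.imp (fun h => ne_of_lt h)
  rw [PySem.Set.ofList_eq_self_of_nodup _ hnd]
  have hpwf : List.Pairwise (· < ·)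
      ((PySem.List.pyRange 1 (n + 1) 1).filter (fun x => !(PySem.Set.contains s x))) :=
    hpw.filter _
  exact PySem.List.sorted_eq_of_perm_of_pairwise_lt _ _ _ (List.Perm.refl _) hpwf

-- ===== VERDICT (by name: the statement is the Claim_ definition above) =====
theorem solve_spec : Claim_equal_solve := by
  intro n m ws _ _
  unfold Spec_solve solve solve_alt
  dsimp only
  rw [show (([], PySem.Set.empty) : List Int × PySem.Set Int)
      = ((([] : PySem.Set Int)), ([] : PySem.Set Int)) from rfl]
  rw [loopA, ← PySem.Set.ofList_eq_foldl]
  rw [show (List.foldl (fun (d : PySem.Dict Int Int) (p : Int × Int) => d.insert p.2 p.1)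
      PySem.Dict.empty (PySem.List.enumerate ws)) = lastD ws from rfl]
  rw [keepLast_eq, List.reverse_reverse, rest_eq]
  congr 1
  apply List.filter_congr
  intro x _
  have h1 := lastD_contains ws x
  have h2 : PySem.Set.contains (PySem.Set.ofList ws.reverse) x = true ↔ x ∈ ws := by
    rw [PySem.Set.contains_iff, PySem.Set.mem_ofList, List.mem_reverse]
  cases hc1 : PySem.Dict.contains (lastD ws) x
    <;> cases hc2 : PySem.Set.contains (PySem.Set.ofList ws.reverse) x <;> simp_all
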